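-- pv_equiv track=rewrite | github.com/StenTech/ProblemSolving | open.kattis.com/The Clock/theclock.py | solve
-- ===== SOURCE A (Python) =====
-- def solve(angle):
--
--     for h in range(12):
--         for m in range(60):
--             m_angle = 60*m
--             h_angle = 300*h + 5*m
--             if (m_angle - h_angle) % 3600 == angle:
--                 h = str(h).rjust(2, "0")
--                 m = str(m).rjust(2, "0")
--                 return h + ":" + m
-- ===== SOURCE B (Python) =====
-- def solve(angle):
--     # Direct modular solve: for each hour, the minute hand angle must equal
--     # (angle + 300*h) mod 3600 = 55*m, so m is found by division, no inner loop.
--     if not (0 <= angle < 3600):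
--         return None
--     for h in range(12):
--         target = (angle + 300 * h) % 3600
--         m, r = divmod(target, 55)
--         if r == 0 and m < 60:
--             h = str(h).rjust(2, "0")
--             m = str(m).rjust(2, "0")
--             return h + ":" + m
--     return None
-- ===== Notes on version B (the rewrite author's own statement) =====
-- stated objective: alternative
-- what changed: Replaces A's inner brute-force scan over the minutes with a direct modular solve: for each hour B computes the required minute-hand residue and accepts the minute obtained by division iff it divides evenly and is in range, after an initial range check that replaces A's full scan for out-of-range angles.
import Mathlib
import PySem

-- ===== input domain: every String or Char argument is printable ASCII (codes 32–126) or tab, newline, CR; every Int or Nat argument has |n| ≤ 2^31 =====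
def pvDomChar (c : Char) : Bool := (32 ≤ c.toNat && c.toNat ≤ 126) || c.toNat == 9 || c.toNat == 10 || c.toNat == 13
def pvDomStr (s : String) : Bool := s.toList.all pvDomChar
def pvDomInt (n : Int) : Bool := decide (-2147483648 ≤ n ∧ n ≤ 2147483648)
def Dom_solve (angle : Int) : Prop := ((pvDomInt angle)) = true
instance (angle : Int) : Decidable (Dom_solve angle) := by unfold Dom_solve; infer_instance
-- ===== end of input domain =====

-- B removes A's inner brute-force minute loop: for each hour it solves for the minute directly by modular division (objective: alternative; fewer iterations, speed not measurable at this input size).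


-- str.rjust(w, fill): hand port (PySem has no rjust); exact — left-pad with fill to width w.
def pyrjust (s : List Char) (w : Nat) (fill : Char) : List Char :=
  List.replicate (w - s.length) fill ++ s

-- ===== PORT A =====
def solve (angle : Int) : Option String :=
  (PySem.List.pyRange 0 12 1).findSome? (fun h =>
    (PySem.List.pyRange 0 60 1).findSome? (fun m =>
      let m_angle := 60*m
      let h_angle := 300*h + 5*m
      if PySem.Int.mod (m_angle - h_angle) 3600 = angle then
        some (String.ofList (pyrjust (PySem.Int.toStr h).toList 2 '0' ++
              ':' :: pyrjust (PySem.Int.toStr m).toList 2 '0'))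
      else none))

-- ===== PORT B =====
def solve_alt (angle : Int) : Option String :=
  if ¬ (0 ≤ angle ∧ angle < 3600) then none
  else (PySem.List.pyRange 0 12 1).findSome? (fun h =>
    let target := PySem.Int.mod (angle + 300*h) 3600
    let m := PySem.Int.floordiv target 55
    let r := PySem.Int.mod target 55
    if r = 0 ∧ m < 60 then
      some (String.ofList (pyrjust (PySem.Int.toStr h).toList 2 '0' ++
            ':' :: pyrjust (PySem.Int.toStr m).toList 2 '0'))
    else none)

-- ===== PRECONDITION & SPEC =====
def Spec_solve (angle : Int) (out : Option String) : Prop := out = solve_alt angle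
instance (angle : Int) (out : Option String) : Decidable (Spec_solve angle out) := by unfold Spec_solve; infer_instance

-- ===== CLAIM (what is proved, stated in full; the proofs are below) =====
def Claim_equal_solve : Prop := ∀ (angle : Int), Dom_solve angle → Spec_solve angle (solve angle)

-- ===== LEMMAS AND PROOFS =====

theorem pmod3600 (a : Int) : PySem.Int.mod a 3600 = a % 3600 :=
  PySem.Int.mod_eq_emod_of_pos (by norm_num)

theorem pmod55 (a : Int) : PySem.Int.mod a 55 = a % 55 :=
  PySem.Int.mod_eq_emod_of_pos (by norm_num)

theorem pdiv55 (a : Int) : PySem.Int.floordiv a 55 = a / 55 :=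
  PySem.Int.floordiv_eq_ediv_of_pos (by norm_num)

theorem findSome?_congr' {α β : Type} {f g : α → Option β} :
    ∀ l : List α, (∀ x ∈ l, f x = g x) → l.findSome? f = l.findSome? g := by
  intro l
  induction l with
  | nil => intro _; rfl
  | cons a t ih =>
    intro h
    simp only [List.findSome?_cons, h a (by simp)]
    cases g a with
    | none => exact ih (fun x hx => h x (by simp [hx]))
    | some v => rfl

theorem findSome?_eq_none' {α β : Type} {f : α → Option β} :
    ∀ l : List α, (∀ x ∈ l, f x = none) → l.findSome? f = none := by
  intro l
  induction l with
  | nil => intro _; rfl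
  | cons a t ih =>
    intro h
    simp only [List.findSome?_cons, h a (by simp)]
    exact ih (fun x hx => h x (by simp [hx]))

theorem findSome?_eq_of_unique {α β : Type} [DecidableEq α] {f : α → Option β} {x : α} :
    ∀ l : List α, x ∈ l → (∀ y ∈ l, y ≠ x → f y = none) → l.findSome? f = f x := by
  intro l
  induction l with
  | nil => intro hx; exact absurd hx (by simp)
  | cons a t ih =>
    intro hx hnone
    by_cases hax : a = x
    · subst hax
      simp only [List.findSome?_cons]
      cases hfa : f a with
      | some v => rfl
      | none =>
        exact findSome?_eq_none' t (fun y hy => by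
          by_cases hya : y = a
          · rw [hya]; exact hfa
          · exact hnone y (by simp [hy]) hya)
    · simp only [List.findSome?_cons, hnone a (by simp) hax]
      exact ih (by rcases List.mem_cons.mp hx with h | h; exact absurd h.symm hax; exact h)
        (fun y hy => hnone y (by simp [hy]))

-- ===== VERDICT (by name: the statement is the Claim_ definition above) =====
theorem solve_spec : Claim_equal_solve := by
  intro angle _
  unfold Spec_solve solve solve_alt
  by_cases hr : 0 ≤ angle ∧ angle < 3600
  · rw [if_neg (not_not_intro hr)]
    apply findSome?_congr'
    intro h hh
    rw [PySem.List.mem_pyRange_one] at hh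
    dsimp only
    by_cases hc : PySem.Int.mod (PySem.Int.mod (angle + 300*h) 3600) 55 = 0 ∧
        PySem.Int.floordiv (PySem.Int.mod (angle + 300*h) 3600) 55 < 60
    · rw [if_pos hc]
      obtain ⟨hc1, hc2⟩ := hc
      rw [pmod3600] at hc1 hc2 ⊢
      rw [pmod55] at hc1
      rw [pdiv55] at hc2 ⊢
      set m0 : Int := (angle + 300*h) % 3600 / 55 with hm0
      have hkey : 55 * m0 = (angle + 300*h) % 3600 := by omega
      rw [findSome?_eq_of_unique (PySem.List.pyRange 0 60 1) (x := m0)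
        (by rw [PySem.List.mem_pyRange_one]; omega)
        (fun y hy hne => by
          rw [PySem.List.mem_pyRange_one] at hy
          rw [if_neg]
          rw [pmod3600]
          intro hEq
          omega)]
      rw [if_pos]
      rw [pmod3600]
      have : 60*m0 - (300*h + 5*m0) = 55*m0 - 300*h := by ring
      rw [this]
      omega
    · rw [if_neg hc]
      rw [pmod55, pdiv55, pmod3600] at hc
      apply findSome?_eq_none'
      intro m hm
      rw [PySem.List.mem_pyRange_one] at hm
      rw [if_neg]
      rw [pmod3600]
      intro hEq
      have h1 : (0:Int) ≤ (angle + 300*h) % 3600 := Int.emod_nonneg _ (by norm_num)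
      have h2 : (angle + 300*h) % 3600 < 3600 := Int.emod_lt_of_pos _ (by norm_num)
      have ht : (angle + 300*h) % 3600 = 55 * m := by omega
      refine hc ⟨?_, ?_⟩ <;> rw [ht] <;> omega
  · rw [if_pos hr]
    apply findSome?_eq_none'
    intro h _
    apply findSome?_eq_none'
    intro m _
    dsimp only
    rw [if_neg]
    rw [pmod3600]
    have h1 := Int.emod_nonneg (60*m - (300*h + 5*m)) (by norm_num : (3600:Int) ≠ 0)
    have h2 := Int.emod_lt_of_pos (60*m - (300*h + 5*m)) (by norm_num : (0:Int) < 3600)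
    omega
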